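-- pv_equiv track=rewrite | github.com/jhuapl-bio/taxtriage | bin/determine_priority_assembly.py | parse_fasta_header
-- ===== SOURCE A (Python) =====
-- def parse_fasta_header(header):
--     parts = header.split()
--     organism_parts = []
--     strain = None
--     for part in parts:
--         if part.lower() == "strain":
--             strain_index = parts.index(part) + 1
--             if strain_index < len(parts):
--                 strain = parts[strain_index]
--             break
--         organism_parts.append(part)
--     organism_name = " ".join(organism_parts)
--     return organism_name, strain
-- ===== SOURCE B (Python) =====
-- def parse_fasta_header(header):
--     # Structural recursion on the token list: build the organism name
--     # back-to-front, no accumulator, no index arithmetic, no join.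
--     def go(parts):
--         if not parts:
--             return "", None
--         head, rest = parts[0], parts[1:]
--         if head.lower() == "strain":
--             return "", (rest[0] if rest else None)
--         org, strain = go(rest)
--         return (head if not org else head + " " + org), strain
--     return go(header.split())
-- ===== Notes on version B (the rewrite author's own statement) =====
-- stated objective: alternative
-- what changed: Replaces A's iterative scan-and-accumulate loop (token accumulator, a redundant parts.index() rescan, a final space-join) by a structural recursion on the token list that builds the organism string back-to-front, joining the head onto the recursive result only when that result is nonempty; no accumulator, no index arithmetic, no join call.
import Mathlib
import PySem

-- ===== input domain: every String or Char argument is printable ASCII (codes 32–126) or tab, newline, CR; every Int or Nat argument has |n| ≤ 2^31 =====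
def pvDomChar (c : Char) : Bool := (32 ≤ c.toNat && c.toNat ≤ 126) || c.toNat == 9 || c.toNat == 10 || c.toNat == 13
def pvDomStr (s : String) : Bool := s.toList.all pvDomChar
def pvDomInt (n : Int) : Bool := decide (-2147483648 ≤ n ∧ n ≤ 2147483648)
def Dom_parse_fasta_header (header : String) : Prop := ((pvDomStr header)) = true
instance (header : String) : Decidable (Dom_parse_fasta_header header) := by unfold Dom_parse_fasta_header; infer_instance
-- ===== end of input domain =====

-- B replaces A's iterative accumulate-then-join scan by a structural recursion on the
-- token list that builds the organism string back-to-front (objective: alternative).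


-- ===== PORT A =====
-- the for-loop with break, carrying organism_parts as accumulator; `parts` stays in scope
def pvALoop (parts : List String) (acc : List String) : List String → String × Option String
  | [] => (PySem.Str.join " " acc, none)
  | p :: rest =>
    if PySem.Str.lower p = "strain" then
      let si := (PySem.List.index? parts p).getD 0 + 1
      (PySem.Str.join " " acc, if si < parts.length then parts[si]? else none)
    else pvALoop parts (acc ++ [p]) rest

def parse_fasta_header (header : String) : String × Option String :=
  let parts := PySem.Str.split₀ header
  pvALoop parts [] parts

-- ===== PORT B =====
-- Source B's inner recursive `go`: recursion on the tail, joining head onto the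
-- recursive result with " " only when that result is nonempty
def pvGo : List String → String × Option String
  | [] => ("", none)
  | head :: rest =>
    if PySem.Str.lower head = "strain" then
      ("", match rest with | [] => none | x :: _ => some x)
    else
      let r := pvGo rest
      ((if r.1 = "" then head else head ++ " " ++ r.1), r.2)

def parse_fasta_header_alt (header : String) : String × Option String :=
  pvGo (PySem.Str.split₀ header)

-- ===== PRECONDITION & SPEC =====
def Spec_parse_fasta_header (header : String) (out : String × Option String) : Prop := out = parse_fasta_header_alt header
instance (header : String) (out : String × Option String) : Decidable (Spec_parse_fasta_header header out) := by unfold Spec_parse_fasta_header; infer_instance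

-- ===== CLAIM (what is proved, stated in full; the proofs are below) =====
def Claim_equal_parse_fasta_header : Prop := ∀ (header : String), Dom_parse_fasta_header header → Spec_parse_fasta_header header (parse_fasta_header header)

-- ===== LEMMAS AND PROOFS =====

-- proof-only middle form: first case-insensitive "strain" position, slice around it
def pvMid (parts : List String) : String × Option String :=
  match PySem.List.index? (parts.map PySem.Str.lower) "strain" with
  | some i => (PySem.Str.join " " (parts.take i), if i + 1 < parts.length then parts[i+1]? else none)
  | none => (PySem.Str.join " " parts, none)

lemma pvALoop_eq (rest : List String) : ∀ (pre : List String),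
    (∀ p ∈ pre, PySem.Str.lower p ≠ "strain") →
    pvALoop (pre ++ rest) pre rest = pvMid (pre ++ rest) := by
  induction rest with
  | nil =>
    intro pre hpre
    have hidx : PySem.List.index? ((pre ++ ([] : List String)).map PySem.Str.lower) "strain" = none := by
      rw [PySem.List.index?_eq_none_iff]
      simp only [List.append_nil, List.mem_map]
      rintro ⟨p, hp, hlow⟩
      exact hpre p hp hlow
    rw [PySem.List.index?_eq_idxOf?] at hidx
    simp only [List.append_nil] at hidx
    simp [pvALoop, pvMid, hidx]
  | cons p rest ih =>
    intro pre hpre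
    by_cases hlow : PySem.Str.lower p = "strain"
    · have hpnot : p ∉ pre := fun hp => hpre p hp hlow
      have hidxA : PySem.List.index? (pre ++ p :: rest) p = some pre.length := by
        rw [PySem.List.index?_eq_some_iff]
        exact ⟨pre, rest, rfl, rfl, hpnot⟩
      have hidxB : PySem.List.index? ((pre ++ p :: rest).map PySem.Str.lower) "strain"
          = some pre.length := by
        rw [PySem.List.index?_eq_some_iff]
        refine ⟨pre.map PySem.Str.lower, rest.map PySem.Str.lower, ?_, by simp, ?_⟩
        · simp [hlow]
        · simp only [List.mem_map]
          rintro ⟨q, hq, hlq⟩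
          exact hpre q hq hlq
      have htake : (pre ++ p :: rest).take pre.length = pre := by
        exact List.take_left
      rw [PySem.List.index?_eq_idxOf?] at hidxA hidxB
      simp only [List.map_append, List.map_cons, hlow] at hidxB
      simp [pvALoop, pvMid, hlow, hidxA, hidxB, htake]
    · have step : pvALoop (pre ++ p :: rest) pre (p :: rest)
          = pvALoop ((pre ++ [p]) ++ rest) (pre ++ [p]) rest := by
        simp [pvALoop, hlow]
      rw [step, ih (pre ++ [p]) (by
        intro q hq
        rcases List.mem_append.mp hq with h | h
        · exact hpre q h
        · simpa [List.mem_singleton.mp h] using hlow)]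
      simp

-- a " ".join of a nonempty list of nonempty tokens is nonempty
lemma pvJoin_ne_empty (l : List String) (hne : l ≠ []) (h : ∀ q ∈ l, q ≠ "") :
    PySem.Str.join " " l ≠ "" := by
  intro hcontra
  have := congrArg String.toList hcontra
  rw [PySem.Str.toList_join] at this
  match l, hne with
  | [x], _ =>
    simp only [List.map_cons, List.map_nil, PySem.Chars.join_singleton] at this
    exact h x (by simp) (String.toList_inj.mp (by simpa using this))
  | x :: y :: xs, _ =>
    rw [List.map_cons, List.map_cons, PySem.Chars.join_cons_cons] at this
    simp at this

-- joining a head onto a tail of nonempty tokens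
lemma pvJoin_cons (p : String) (l : List String) (h : ∀ q ∈ l, q ≠ "") :
    PySem.Str.join " " (p :: l)
      = if PySem.Str.join " " l = "" then p else p ++ " " ++ PySem.Str.join " " l := by
  match l with
  | [] =>
    have : PySem.Str.join " " ([] : List String) = "" := by decide
    rw [this]
    simp only [if_pos trivial]
    apply String.toList_inj.mp
    rw [PySem.Str.toList_join]
    simp [PySem.Chars.join_singleton]
  | x :: xs =>
    rw [if_neg (pvJoin_ne_empty (x :: xs) (by simp) h)]
    apply String.toList_inj.mp
    rw [String.toList_append, String.toList_append, PySem.Str.toList_join, PySem.Str.toList_join]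
    simp [PySem.Chars.join_cons_cons]

lemma pvGo_eq_pvMid (parts : List String) (h : ∀ q ∈ parts, q ≠ "") :
    pvGo parts = pvMid parts := by
  induction parts with
  | nil => simp [pvGo, pvMid, PySem.List.index?_eq_idxOf?]; decide
  | cons p rest ih =>
    by_cases hlow : PySem.Str.lower p = "strain"
    · simp only [pvGo, pvMid, hlow, PySem.List.index?_eq_idxOf?, List.map_cons,
        List.idxOf?_cons, beq_iff_eq]
      cases rest with
      | nil => simp; decide
      | cons x xs =>
        simp only [List.length_cons]
        have : PySem.Str.join " " ([] : List String) = "" := by decide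
        simp [this]
    · have hrest : ∀ q ∈ rest, q ≠ "" := fun q hq => h q (List.mem_cons_of_mem _ hq)
      have hgo : pvGo (p :: rest)
          = ((if (pvGo rest).1 = "" then p else p ++ " " ++ (pvGo rest).1), (pvGo rest).2) := by
        simp [pvGo, hlow]
      rw [hgo, ih hrest]
      cases hidx : List.idxOf? "strain" (rest.map PySem.Str.lower) with
      | none =>
        have h1 : pvMid rest = (PySem.Str.join " " rest, none) := by
          simp [pvMid, PySem.List.index?_eq_idxOf?, hidx]
        have h2 : pvMid (p :: rest) = (PySem.Str.join " " (p :: rest), none) := by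
          simp [pvMid, PySem.List.index?_eq_idxOf?, List.idxOf?_cons, hlow, hidx]
        rw [h1, h2, pvJoin_cons p rest hrest]
      | some i =>
        have h1 : pvMid rest
            = (PySem.Str.join " " (rest.take i),
               if i + 1 < rest.length then rest[i+1]? else none) := by
          simp [pvMid, PySem.List.index?_eq_idxOf?, hidx]
        have h2 : pvMid (p :: rest)
            = (PySem.Str.join " " (p :: rest.take i),
               if i + 1 < rest.length then rest[i+1]? else none) := by
          simp [pvMid, PySem.List.index?_eq_idxOf?, List.idxOf?_cons, hlow, hidx,
            List.take_succ_cons, List.getElem?_cons_succ]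
        rw [h1, h2, pvJoin_cons p (rest.take i) (fun q hq => hrest q (List.mem_of_mem_take hq))]

-- pieces of split₀.go are nonempty (cur is flushed only when nonempty)
lemma pvSplitGo_ne (s : List Char) : ∀ (cur : List Char) (acc : List (List Char)),
    (∀ p ∈ acc, p ≠ []) → ∀ p ∈ PySem.Chars.split₀.go s cur acc, p ≠ [] := by
  induction s with
  | nil =>
    intro cur acc hacc p hp
    by_cases hcur : cur.isEmpty
    · rw [PySem.Chars.split₀.go, if_pos hcur] at hp
      exact hacc p (List.mem_reverse.mp hp)
    · rw [PySem.Chars.split₀.go, if_neg hcur] at hp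
      rcases List.mem_cons.mp (List.mem_reverse.mp hp) with h | h
      · subst h
        intro hnil
        apply hcur
        simp only [List.isEmpty_iff]
        exact List.reverse_eq_nil_iff.mp hnil
      · exact hacc p h
  | cons c cs ih =>
    intro cur acc hacc p hp
    rw [PySem.Chars.split₀.go] at hp
    by_cases hsp : PySem.Chars.isspace c
    · rw [if_pos hsp] at hp
      by_cases hcur : cur.isEmpty
      · rw [if_pos hcur] at hp
        exact ih [] acc hacc p hp
      · rw [if_neg hcur] at hp
        refine ih [] (cur.reverse :: acc) ?_ p hp
        intro q hq
        rcases List.mem_cons.mp hq with hq1 | hq1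
        · subst hq1
          intro hnil
          apply hcur
          simp only [List.isEmpty_iff]
          exact List.reverse_eq_nil_iff.mp hnil
        · exact hacc q hq1
    · rw [if_neg hsp] at hp
      exact ih (c :: cur) acc hacc p hp

lemma pvSplit₀_ne (s : String) : ∀ q ∈ PySem.Str.split₀ s, q ≠ "" := by
  intro q hq
  rcases List.mem_map.mp hq with ⟨l, hl, rfl⟩
  have hlne : l ≠ [] := pvSplitGo_ne s.toList [] [] (by simp) l hl
  intro hcontra
  exact hlne (by simpa using congrArg String.toList hcontra)

-- ===== VERDICT (by name: the statement is the Claim_ definition above) =====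
theorem parse_fasta_header_spec : Claim_equal_parse_fasta_header := by
  intro header _
  unfold Spec_parse_fasta_header parse_fasta_header parse_fasta_header_alt
  rw [pvGo_eq_pvMid (PySem.Str.split₀ header) (pvSplit₀_ne header)]
  simpa using pvALoop_eq (PySem.Str.split₀ header) [] (by simp)
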